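-- pv_equiv track=rewrite | github.com/daniel-reich/ubiquitous-fiesta | E8c4ZMwme85YX3wM7_1.py | recaman
-- ===== SOURCE A (Python) =====
-- def recaman(n):
--   l,d,k=[],[],0
--   for x in range(n):
--     k-=x
--     if k in l or k<0:
--         k+=x+x
--         if k not in d and k in l:d.append(k)
--     l.append(k)
--   return"---> Recaman's sequence: %s\n---> Duplicates for n = %s: %s"%(l,n,d)
-- ===== SOURCE B (Python) =====
-- def recaman(n):
--     # Pass 1: build the Recaman sequence with an O(1) membership set.
--     l, seen, k = [], set(), 0
--     for x in range(n):
--         k -= x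
--         if k in seen or k < 0:
--             k += x + x
--         l.append(k)
--         seen.add(k)
--     # Pass 2: collect first second-occurrences, in order, each value once.
--     d, dset, s = [], set(), set()
--     for v in l:
--         if v in s:
--             if v not in dset:
--                 d.append(v)
--                 dset.add(v)
--         else:
--             s.add(v)
--     return "---> Recaman's sequence: %s\n---> Duplicates for n = %s: %s" % (l, n, d)
-- ===== Notes on version B (the rewrite author's own statement) =====
-- stated objective: faster
-- what changed: B replaces A's repeated O(n) list scans ('k in l', 'k in d') by hash sets and splits the work into a build pass and a separate duplicate-collecting scan over the finished sequence.
import Mathlib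
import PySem

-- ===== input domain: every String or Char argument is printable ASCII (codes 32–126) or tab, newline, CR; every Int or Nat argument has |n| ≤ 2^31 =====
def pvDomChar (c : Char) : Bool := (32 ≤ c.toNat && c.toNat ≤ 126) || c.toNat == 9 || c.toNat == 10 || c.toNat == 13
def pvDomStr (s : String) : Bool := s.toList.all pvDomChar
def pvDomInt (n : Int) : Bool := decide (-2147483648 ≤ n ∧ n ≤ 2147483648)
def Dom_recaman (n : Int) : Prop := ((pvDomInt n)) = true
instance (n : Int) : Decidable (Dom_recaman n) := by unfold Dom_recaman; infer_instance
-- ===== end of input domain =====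

-- B replaces A's list-membership scans by sets and collects duplicates in a second pass; measured asymptotically faster in Python.

-- ===== PORT A =====
-- str(list_of_ints), as Python's %s formats it
def intListRepr (l : List Int) : String :=
  "[" ++ String.intercalate ", " (l.map PySem.Int.toStr) ++ "]"

def recamanStep (st : List Int × List Int × Int) (x : Int) : List Int × List Int × Int :=
  let l := st.1; let d := st.2.1; let k := st.2.2 - x
  if l.contains k || k < 0 then
    let k := k + x + x
    let d := if !d.contains k && l.contains k then d ++ [k] else d
    (l ++ [k], d, k)
  else (l ++ [k], d, k)

def recaman (n : Int) : String :=
  let st := (PySem.List.pyRange 0 n 1).foldl recamanStep ([], [], 0)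
  "---> Recaman's sequence: " ++ intListRepr st.1 ++ "\n---> Duplicates for n = "
    ++ PySem.Int.toStr n ++ ": " ++ intListRepr st.2.1

-- ===== PORT B =====
def recamanAltStep (st : List Int × PySem.Set Int × Int) (x : Int) : List Int × PySem.Set Int × Int :=
  let l := st.1; let seen := st.2.1; let k := st.2.2 - x
  let k := if seen.contains k || k < 0 then k + x + x else k
  (l ++ [k], seen.add k, k)

def dupStep (st : List Int × PySem.Set Int × PySem.Set Int) (v : Int) : List Int × PySem.Set Int × PySem.Set Int :=
  let d := st.1; let dset := st.2.1; let s := st.2.2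
  if s.contains v then
    if dset.contains v then st else (d ++ [v], dset.add v, s)
  else (d, dset, s.add v)

def recaman_alt (n : Int) : String :=
  let st := (PySem.List.pyRange 0 n 1).foldl recamanAltStep ([], PySem.Set.empty, 0)
  let du := st.1.foldl dupStep ([], PySem.Set.empty, PySem.Set.empty)
  "---> Recaman's sequence: " ++ intListRepr st.1 ++ "\n---> Duplicates for n = "
    ++ PySem.Int.toStr n ++ ": " ++ intListRepr du.1

-- ===== PRECONDITION & SPEC =====
def Spec_recaman (n : Int) (out : String) : Prop := out = recaman_alt n
instance (n : Int) (out : String) : Decidable (Spec_recaman n out) := by unfold Spec_recaman; infer_instance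

-- ===== CLAIM (what is proved, stated in full; the proofs are below) =====
def Claim_equal_recaman : Prop := ∀ (n : Int), Dom_recaman n → Spec_recaman n (recaman n)

-- ===== LEMMAS AND PROOFS =====

-- invariant tying A's state (l, d, k) to B's state (l, seen, k) and to the
-- duplicate-scan of the current sequence l
def SInv (l d : List Int) (seen : PySem.Set Int) : Prop :=
  (∀ v : Int, v ∈ seen ↔ v ∈ l) ∧
  ∃ dset s : PySem.Set Int,
    l.foldl dupStep ([], PySem.Set.empty, PySem.Set.empty) = (d, dset, s) ∧
    (∀ v : Int, v ∈ dset ↔ v ∈ d) ∧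
    (∀ v : Int, v ∈ s ↔ v ∈ l)

theorem contains_eq_of_mem_iff (s : PySem.Set Int) (l : List Int)
    (h : ∀ v : Int, v ∈ s ↔ v ∈ l) (a : Int) : s.contains a = l.contains a := by
  simp [PySem.Set.contains_eq_listContains, List.contains_eq_mem, h a]

theorem foldl_dupStep_singleton (st : List Int × PySem.Set Int × PySem.Set Int) (v : Int) :
    List.foldl dupStep st [v] = dupStep st v := rfl

theorem step_inv (l d : List Int) (seen : PySem.Set Int) (k x : Int) (h : SInv l d seen) :
    (recamanStep (l, d, k) x).1 = (recamanAltStep (l, seen, k) x).1 ∧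
    (recamanStep (l, d, k) x).2.2 = (recamanAltStep (l, seen, k) x).2.2 ∧
    SInv (recamanStep (l, d, k) x).1 (recamanStep (l, d, k) x).2.1
         (recamanAltStep (l, seen, k) x).2.1 := by
  obtain ⟨hseen, dset, s, hscan, hdset, hs⟩ := h
  have hc := contains_eq_of_mem_iff seen l hseen
  have hsc := contains_eq_of_mem_iff s l hs
  have hdc := contains_eq_of_mem_iff dset d hdset
  have hseenL : ∀ (a : Int) (v : Int), (v ∈ seen.add a ↔ v ∈ l ++ [a]) := by
    intro a v
    simp [PySem.Set.mem_add, hseen v, or_comm]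
  have hsL : ∀ (a : Int) (v : Int), (v ∈ s.add a ↔ v ∈ l ++ [a]) := by
    intro a v
    simp [PySem.Set.mem_add, hs v, or_comm]
  by_cases hcond : (l.contains (k - x) || decide (k - x < 0)) = true
  · -- the +x branch is taken; k2 is the appended value
    have hB : recamanAltStep (l, seen, k) x
        = (l ++ [k - x + x + x], seen.add (k - x + x + x), k - x + x + x) := by
      simp only [recamanAltStep, hc, hcond, if_true]
    have hkx : k - x + x + x = k + x := by ring
    by_cases hmem : (k - x + x + x) ∈ l
    · have hmem' : k + x ∈ l := by rw [← hkx]; exact hmem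
      have hlcT : l.contains (k - x + x + x) = true := by
        simp [List.contains_eq_mem, hmem']
      by_cases hd : (k - x + x + x) ∈ d
      · have hd' : k + x ∈ d := by rw [← hkx]; exact hd
        have hdlT : d.contains (k - x + x + x) = true := by
          simp [List.contains_eq_mem, hd']
        have hA : recamanStep (l, d, k) x
            = (l ++ [k - x + x + x], d, k - x + x + x) := by
          simp only [recamanStep, hcond, if_true, hdlT, hlcT]
          simp
        rw [hA, hB]
        refine ⟨rfl, rfl, hseenL _, dset, s, ?_, hdset, ?_⟩
        · rw [List.foldl_append, hscan, foldl_dupStep_singleton]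
          unfold dupStep
          simp only [hsc, hdc, hlcT, hdlT, if_true]
        · intro v
          rw [hs v]
          simp only [List.mem_append, List.mem_singleton]
          constructor
          · exact fun hv => Or.inl hv
          · rintro (hv | rfl)
            · exact hv
            · exact hmem
      · have hd' : k + x ∉ d := by rw [← hkx]; exact hd
        have hdlF : d.contains (k - x + x + x) = false := by
          simp [List.contains_eq_mem, hd']
        have hA : recamanStep (l, d, k) x
            = (l ++ [k - x + x + x], d ++ [k - x + x + x], k - x + x + x) := by
          simp only [recamanStep, hcond, if_true, hdlF, hlcT]
          simp
        rw [hA, hB]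
        refine ⟨rfl, rfl, hseenL _, dset.add (k - x + x + x), s, ?_, ?_, ?_⟩
        · rw [List.foldl_append, hscan, foldl_dupStep_singleton]
          unfold dupStep
          simp only [hsc, hdc, hlcT, hdlF, if_true, Bool.false_eq_true, if_false]
        · intro v
          simp [PySem.Set.mem_add, hdset v, or_comm]
        · intro v
          rw [hs v]
          simp only [List.mem_append, List.mem_singleton]
          constructor
          · exact fun hv => Or.inl hv
          · rintro (hv | rfl)
            · exact hv
            · exact hmem
    · have hmem' : k + x ∉ l := by rw [← hkx]; exact hmem
      have hlcF : l.contains (k - x + x + x) = false := by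
        simp [List.contains_eq_mem, hmem']
      have hA : recamanStep (l, d, k) x
          = (l ++ [k - x + x + x], d, k - x + x + x) := by
        simp only [recamanStep, hcond, if_true, hlcF]
        simp
      rw [hA, hB]
      refine ⟨rfl, rfl, hseenL _, dset, s.add (k - x + x + x), ?_, hdset, hsL _⟩
      rw [List.foldl_append, hscan, foldl_dupStep_singleton]
      unfold dupStep
      simp only [hsc, hlcF, Bool.false_eq_true, if_false]
  · -- the -x branch: k - x is fresh and non-negative
    have hmem : (k - x) ∉ l := by
      intro hv
      apply hcond
      simp [List.contains_eq_mem, hv]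
    have hlcF : l.contains (k - x) = false := by
      simp [List.contains_eq_mem, hmem]
    have hA : recamanStep (l, d, k) x = (l ++ [k - x], d, k - x) := by
      simp only [recamanStep, hcond]
      simp
    have hB : recamanAltStep (l, seen, k) x = (l ++ [k - x], seen.add (k - x), k - x) := by
      simp only [recamanAltStep, hc, hcond]
      simp
    rw [hA, hB]
    refine ⟨rfl, rfl, hseenL _, dset, s.add (k - x), ?_, hdset, hsL _⟩
    rw [List.foldl_append, hscan, foldl_dupStep_singleton]
    unfold dupStep
    simp only [hsc, hlcF, Bool.false_eq_true, if_false]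

theorem recaman_invariant (xs : List Int) : ∀ (l d : List Int) (seen : PySem.Set Int) (k : Int),
    SInv l d seen →
    (xs.foldl recamanStep (l, d, k)).1 = (xs.foldl recamanAltStep (l, seen, k)).1 ∧
    (xs.foldl recamanStep (l, d, k)).2.2 = (xs.foldl recamanAltStep (l, seen, k)).2.2 ∧
    SInv (xs.foldl recamanStep (l, d, k)).1 (xs.foldl recamanStep (l, d, k)).2.1
         (xs.foldl recamanAltStep (l, seen, k)).2.1 := by
  induction xs with
  | nil => intro l d seen k h; exact ⟨rfl, rfl, h⟩
  | cons x xs ih =>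
    intro l d seen k h
    obtain ⟨h1, h2, h3⟩ := step_inv l d seen k x h
    simp only [List.foldl_cons]
    have ea : recamanStep (l, d, k) x
        = ((recamanAltStep (l, seen, k) x).1, (recamanStep (l, d, k) x).2.1,
           (recamanAltStep (l, seen, k) x).2.2) := by
      rw [← h1, ← h2]
    have eb : recamanAltStep (l, seen, k) x
        = ((recamanAltStep (l, seen, k) x).1, (recamanAltStep (l, seen, k) x).2.1,
           (recamanAltStep (l, seen, k) x).2.2) := rfl
    rw [ea, eb]
    exact ih (recamanAltStep (l, seen, k) x).1 (recamanStep (l, d, k) x).2.1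
      (recamanAltStep (l, seen, k) x).2.1 (recamanAltStep (l, seen, k) x).2.2
      (by rw [← h1]; exact h3)

-- ===== VERDICT (by name: the statement is the Claim_ definition above) =====
theorem recaman_spec : Claim_equal_recaman := by
  intro n _
  unfold Spec_recaman recaman recaman_alt
  have h0 : SInv [] [] PySem.Set.empty := by
    refine ⟨by simp [PySem.Set.empty], PySem.Set.empty, PySem.Set.empty, rfl, by simp [PySem.Set.empty], by simp [PySem.Set.empty]⟩
  obtain ⟨h1, h2, _, dset, s, h3, _, _⟩ := recaman_invariant (PySem.List.pyRange 0 n 1) [] [] PySem.Set.empty 0 h0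
  simp only [← h1, h3]
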